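-- pv_equiv track=rewrite | github.com/Diogodalves/data-analysis | dataAnalysis/dataAnalysis.py | modal_class
-- ===== SOURCE A (Python) =====
-- def modal_class(variable1,variable2,amplitude):
--     x = max(variable1)
--     y = 0
--     class_y = 0
--     for i in range(len(variable1)):
--         if (variable1[i]==x):
--             y = variable2[i]
--     class_y = [y,y+amplitude]
--     return x, class_y;
-- ===== SOURCE B (Python) =====
-- def modal_class(variable1, variable2, amplitude):
--     # single pass: running maximum x and its associated value y (>= so the last occurrence wins)
--     x = variable1[0]
--     y = variable2[0]
--     for i in range(1, len(variable1)):
--         if x <= variable1[i]: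
--             x = variable1[i]
--             y = variable2[i]
--     return x, [y, y + amplitude]
-- ===== Notes on version B (the rewrite author's own statement) =====
-- stated objective: alternative
-- what changed: Replaces max() plus a full second scan for the last maximal index with one pass keeping a running maximum and its associated class value (>= so the last occurrence wins).
import Mathlib
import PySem

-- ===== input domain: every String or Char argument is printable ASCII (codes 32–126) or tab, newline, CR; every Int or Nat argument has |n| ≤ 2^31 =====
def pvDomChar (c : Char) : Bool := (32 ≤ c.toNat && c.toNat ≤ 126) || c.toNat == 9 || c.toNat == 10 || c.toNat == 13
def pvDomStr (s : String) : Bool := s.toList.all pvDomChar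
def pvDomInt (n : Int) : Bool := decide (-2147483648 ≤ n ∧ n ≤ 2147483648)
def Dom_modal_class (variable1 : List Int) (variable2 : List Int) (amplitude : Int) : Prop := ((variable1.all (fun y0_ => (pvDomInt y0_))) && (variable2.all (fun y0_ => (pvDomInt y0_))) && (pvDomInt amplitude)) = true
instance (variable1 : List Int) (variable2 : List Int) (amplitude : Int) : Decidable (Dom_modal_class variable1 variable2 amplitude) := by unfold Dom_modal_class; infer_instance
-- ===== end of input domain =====

-- B replaces A's max() + second scan by one pass tracking the running maximum and its class value (alternative decomposition, same cost).


-- ===== PORT A =====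
def modal_class (variable1 : List Int) (variable2 : List Int) (amplitude : Int) : Int × List Int :=
  match PySem.List.max? variable1 (fun y => y) with
  | none => (0, [])   -- max([]) raises ValueError; excluded by Pre_
  | some x =>
    -- for i in range(len(variable1)): if variable1[i]==x: y = variable2[i]
    -- variable2[i] may raise IndexError in Python; Pre_ excludes exactly those inputs.
    let y := (PySem.List.pyRange 0 (variable1.length : Int) 1).foldl
      (fun y i => if PySem.List.pyGetD variable1 i 0 = x then PySem.List.pyGetD variable2 i 0 else y) 0
    (x, [y, y + amplitude])

-- ===== PORT B =====
def modal_class_alt (variable1 : List Int) (variable2 : List Int) (amplitude : Int) : Int × List Int :=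
  -- variable1[0] / variable2[0] raise on empty lists in Python; excluded by Pre_.
  let s := (PySem.List.pyRange 1 (variable1.length : Int) 1).foldl
    (fun (s : Int × Int) i =>
      if s.1 ≤ PySem.List.pyGetD variable1 i 0 then
        (PySem.List.pyGetD variable1 i 0, PySem.List.pyGetD variable2 i 0)
      else s)
    (PySem.List.pyGetD variable1 0 0, PySem.List.pyGetD variable2 0 0)
  (s.1, [s.2, s.2 + amplitude])

-- ===== PRECONDITION & SPEC =====
-- Pre_ excludes exactly the inputs where the Python A raises: empty variable1 (ValueError from max)
-- and inputs where some index holding the maximum is out of range for variable2 (IndexError).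
def Pre_modal_class (variable1 : List Int) (variable2 : List Int) (amplitude : Int) : Prop :=
  variable1 ≠ [] ∧ ∀ i ∈ List.range variable1.length,
    (∀ z ∈ variable1, z ≤ variable1.getD i 0) → i < variable2.length
instance (variable1 : List Int) (variable2 : List Int) (amplitude : Int) : Decidable (Pre_modal_class variable1 variable2 amplitude) := by unfold Pre_modal_class; infer_instance
def pvWitness_modal_class : List Int × List Int × Int := ([1, 2], [3, 4], 5)
def Spec_modal_class (variable1 : List Int) (variable2 : List Int) (amplitude : Int) (out : Int × List Int) : Prop := out = modal_class_alt variable1 variable2 amplitude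
instance (variable1 : List Int) (variable2 : List Int) (amplitude : Int) (out : Int × List Int) : Decidable (Spec_modal_class variable1 variable2 amplitude out) := by unfold Spec_modal_class; infer_instance

-- ===== CLAIM (what is proved, stated in full; the proofs are below) =====
def Claim_equal_modal_class : Prop := ∀ (variable1 : List Int) (variable2 : List Int) (amplitude : Int), Dom_modal_class variable1 variable2 amplitude → Pre_modal_class variable1 variable2 amplitude → Spec_modal_class variable1 variable2 amplitude (modal_class variable1 variable2 amplitude)

-- ===== LEMMAS AND PROOFS =====

-- Coupled invariant after processing indices < m: B's state carries the prefix maximum and,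
-- whenever that prefix maximum already equals the global bound X, A's partial y equals B's y.
theorem modal_inv (v1 v2 : List Int) (X : Int) (hX : ∀ z ∈ v1, z ≤ X)
    (m : Nat) (h1 : 1 ≤ m) (hm : m ≤ v1.length) :
    (∀ j : Nat, j < m → PySem.List.pyGetD v1 (j : Int) 0 ≤
        ((PySem.List.pyRange 1 (m : Int) 1).foldl
          (fun (s : Int × Int) i =>
            if s.1 ≤ PySem.List.pyGetD v1 i 0 then
              (PySem.List.pyGetD v1 i 0, PySem.List.pyGetD v2 i 0) else s)
          (PySem.List.pyGetD v1 0 0, PySem.List.pyGetD v2 0 0)).1) ∧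
    (∃ j : Nat, j < m ∧
        ((PySem.List.pyRange 1 (m : Int) 1).foldl
          (fun (s : Int × Int) i =>
            if s.1 ≤ PySem.List.pyGetD v1 i 0 then
              (PySem.List.pyGetD v1 i 0, PySem.List.pyGetD v2 i 0) else s)
          (PySem.List.pyGetD v1 0 0, PySem.List.pyGetD v2 0 0)).1 = PySem.List.pyGetD v1 (j : Int) 0) ∧
    ((((PySem.List.pyRange 1 (m : Int) 1).foldl
          (fun (s : Int × Int) i =>
            if s.1 ≤ PySem.List.pyGetD v1 i 0 then
              (PySem.List.pyGetD v1 i 0, PySem.List.pyGetD v2 i 0) else s)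
          (PySem.List.pyGetD v1 0 0, PySem.List.pyGetD v2 0 0)).1 = X →
        (PySem.List.pyRange 0 (m : Int) 1).foldl
          (fun y i => if PySem.List.pyGetD v1 i 0 = X then PySem.List.pyGetD v2 i 0 else y) 0 =
        ((PySem.List.pyRange 1 (m : Int) 1).foldl
          (fun (s : Int × Int) i =>
            if s.1 ≤ PySem.List.pyGetD v1 i 0 then
              (PySem.List.pyGetD v1 i 0, PySem.List.pyGetD v2 i 0) else s)
          (PySem.List.pyGetD v1 0 0, PySem.List.pyGetD v2 0 0)).2) ∧
      (((PySem.List.pyRange 1 (m : Int) 1).foldl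
          (fun (s : Int × Int) i =>
            if s.1 ≤ PySem.List.pyGetD v1 i 0 then
              (PySem.List.pyGetD v1 i 0, PySem.List.pyGetD v2 i 0) else s)
          (PySem.List.pyGetD v1 0 0, PySem.List.pyGetD v2 0 0)).1 ≠ X →
        (PySem.List.pyRange 0 (m : Int) 1).foldl
          (fun y i => if PySem.List.pyGetD v1 i 0 = X then PySem.List.pyGetD v2 i 0 else y) 0 = 0)) := by
  induction m, h1 using Nat.le_induction with
  | base =>
    have hB : PySem.List.pyRange 1 (1 : Int) 1 = [] := PySem.List.pyRange_one_eq_nil (by omega)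
    have hA : PySem.List.pyRange 0 (1 : Int) 1 = [0] := by
      have := PySem.List.pyRange_one_singleton (a := (0 : Int)); simpa using this
    simp only [Nat.cast_one, hA, hB, List.foldl_cons, List.foldl_nil]
    refine ⟨?_, ⟨0, by omega, by simp⟩, ?_, ?_⟩
    · intro j hj; interval_cases j; simp
    · intro h; simp [h]
    · intro h; simp_all
  | succ m h1 ih =>
    have hm' : m ≤ v1.length := by omega
    obtain ⟨ub, ⟨jx, hjx, hval⟩, hsync, hzero⟩ := ih hm'
    have hvm : PySem.List.pyGetD v1 (m : Int) 0 ≤ X := by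
      have hmem : PySem.List.pyGetD v1 (m : Int) 0 ∈ v1 := by
        apply PySem.List.pyGetD_mem
        simp [PySem.Raise.InRange]; omega
      exact hX _ hmem
    have hAstep : PySem.List.pyRange 0 ((m + 1 : Nat) : Int) 1
        = PySem.List.pyRange 0 (m : Int) 1 ++ [(m : Int)] := by
      push_cast
      exact PySem.List.pyRange_one_succ_right (by positivity)
    have hBstep : PySem.List.pyRange 1 ((m + 1 : Nat) : Int) 1
        = PySem.List.pyRange 1 (m : Int) 1 ++ [(m : Int)] := by
      push_cast
      exact PySem.List.pyRange_one_succ_right (by exact_mod_cast h1)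
    have hBub : (((PySem.List.pyRange 1 (m : Int) 1).foldl
          (fun (s : Int × Int) i =>
            if s.1 ≤ PySem.List.pyGetD v1 i 0 then
              (PySem.List.pyGetD v1 i 0, PySem.List.pyGetD v2 i 0) else s)
          (PySem.List.pyGetD v1 0 0, PySem.List.pyGetD v2 0 0)).1) ≤ X := by
      rw [hval]
      have hmem : PySem.List.pyGetD v1 (jx : Int) 0 ∈ v1 := by
        apply PySem.List.pyGetD_mem
        simp [PySem.Raise.InRange]; omega
      exact hX _ hmem
    rw [hAstep, hBstep, List.foldl_append, List.foldl_append]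
    simp only [List.foldl_cons, List.foldl_nil]
    by_cases hcmp : (((PySem.List.pyRange 1 (m : Int) 1).foldl
          (fun (s : Int × Int) i =>
            if s.1 ≤ PySem.List.pyGetD v1 i 0 then
              (PySem.List.pyGetD v1 i 0, PySem.List.pyGetD v2 i 0) else s)
          (PySem.List.pyGetD v1 0 0, PySem.List.pyGetD v2 0 0)).1) ≤ PySem.List.pyGetD v1 (m : Int) 0
    · simp only [if_pos hcmp]
      refine ⟨?_, ⟨m, by omega, by simp⟩, ?_, ?_⟩
      · intro j hj
        rcases Nat.lt_succ_iff_lt_or_eq.mp hj with h | h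
        · exact le_trans (ub j h) hcmp
        · subst h; exact le_rfl
      · intro h; rw [if_pos h]
      · intro h; rw [if_neg h]
        apply hzero
        intro hEq
        exact h (le_antisymm hvm (hEq ▸ hcmp))
    · simp only [if_neg hcmp]
      have hlt : PySem.List.pyGetD v1 (m : Int) 0 < (((PySem.List.pyRange 1 (m : Int) 1).foldl
          (fun (s : Int × Int) i =>
            if s.1 ≤ PySem.List.pyGetD v1 i 0 then
              (PySem.List.pyGetD v1 i 0, PySem.List.pyGetD v2 i 0) else s)
          (PySem.List.pyGetD v1 0 0, PySem.List.pyGetD v2 0 0)).1) := lt_of_not_ge hcmp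
      have hne : PySem.List.pyGetD v1 (m : Int) 0 ≠ X := fun hEq => by
        rw [hEq] at hlt; exact absurd hBub (not_le.mpr hlt)
      rw [if_neg hne]
      refine ⟨?_, ⟨jx, by omega, hval⟩, hsync, hzero⟩
      intro j hj
      rcases Nat.lt_succ_iff_lt_or_eq.mp hj with h | h
      · exact ub j h
      · subst h; exact le_of_lt hlt

-- ===== VERDICT (by name: the statement is the Claim_ definition above) =====
theorem modal_class_spec : Claim_equal_modal_class := by
  intro v1 v2 amp _ hpre
  obtain ⟨hne, _⟩ := hpre
  unfold Spec_modal_class modal_class modal_class_alt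
  obtain ⟨a, t, rfl⟩ : ∃ a t, v1 = a :: t := List.exists_cons_of_ne_nil hne
  rw [PySem.List.max?_id_cons]
  simp only
  set v1 := a :: t with hv1
  set X := t.foldl max a with hXdef
  have hmax : PySem.List.max? v1 (fun y => y) = some X := by
    rw [hv1, PySem.List.max?_id_cons]
  have hX : ∀ z ∈ v1, z ≤ X := fun z hz => PySem.List.max?_isMax hmax z hz
  have hXmem : X ∈ v1 := PySem.List.max?_mem hmax
  obtain ⟨jx, hjx, hjval⟩ := List.getElem_of_mem hXmem
  have hlen : 1 ≤ v1.length := by rw [hv1]; simp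
  obtain ⟨ub, ⟨jm, hjm, hval⟩, hsync, _⟩ := modal_inv v1 v2 X hX v1.length hlen le_rfl
  have hgetjx : PySem.List.pyGetD v1 (jx : Int) 0 = X := by
    rw [PySem.List.pyGetD_natCast, List.getD_eq_getElem?_getD, List.getElem?_eq_getElem hjx]
    simpa using hjval
  have hB1 : ((PySem.List.pyRange 1 (v1.length : Int) 1).foldl
          (fun (s : Int × Int) i =>
            if s.1 ≤ PySem.List.pyGetD v1 i 0 then
              (PySem.List.pyGetD v1 i 0, PySem.List.pyGetD v2 i 0) else s)
          (PySem.List.pyGetD v1 0 0, PySem.List.pyGetD v2 0 0)).1 = X := by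
    apply le_antisymm
    · rw [hval]
      have hmem : PySem.List.pyGetD v1 (jm : Int) 0 ∈ v1 := by
        apply PySem.List.pyGetD_mem
        simp [PySem.Raise.InRange]; omega
      exact hX _ hmem
    · rw [← hgetjx]; exact ub jx hjx
  have hA := hsync hB1
  rw [hA, hB1]
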